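-- pv_equiv track=rewrite | github.com/0xAA55/madtran | madtran.py | merge_translation_result
-- ===== SOURCE A (Python) =====
-- def merge_translation_result(trans):
-- 	texbuf, tranbuf = '', ''
-- 	prev_is_translated = True
-- 	result = []
-- 	for text, tran in trans:
-- 		if text == tran:
-- 			texbuf += text
-- 			tranbuf += tran
-- 			prev_is_translated = False
-- 		else:
-- 			if not prev_is_translated:
-- 				result += [(texbuf, tranbuf)]
-- 				texbuf, tranbuf = '', ''
-- 				prev_is_translated = True
-- 			result += [(text, tran)]
-- 	if not prev_is_translated:
-- 		result += [(texbuf, tranbuf)]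
-- 	return result
-- ===== SOURCE B (Python) =====
-- def merge_translation_result(trans):
-- 	result = []
-- 	rest = trans
-- 	while rest:
-- 		if rest[0][0] == rest[0][1]:
-- 			k = 0
-- 			while k < len(rest) and rest[k][0] == rest[k][1]:
-- 				k += 1
-- 			run = rest[:k]
-- 			result.append((''.join(p[0] for p in run), ''.join(p[1] for p in run)))
-- 			rest = rest[k:]
-- 		else:
-- 			result.append(rest[0])
-- 			rest = rest[1:]
-- 	return result
-- ===== Notes on version B (the rewrite author's own statement) =====
-- stated objective: alternative
-- what changed: B splits the input into maximal runs (span on text==tran) and emits one merged pair per untranslated run, instead of A's single pass threading buffer strings and a prev_is_translated flag with flushes.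
import Mathlib
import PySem

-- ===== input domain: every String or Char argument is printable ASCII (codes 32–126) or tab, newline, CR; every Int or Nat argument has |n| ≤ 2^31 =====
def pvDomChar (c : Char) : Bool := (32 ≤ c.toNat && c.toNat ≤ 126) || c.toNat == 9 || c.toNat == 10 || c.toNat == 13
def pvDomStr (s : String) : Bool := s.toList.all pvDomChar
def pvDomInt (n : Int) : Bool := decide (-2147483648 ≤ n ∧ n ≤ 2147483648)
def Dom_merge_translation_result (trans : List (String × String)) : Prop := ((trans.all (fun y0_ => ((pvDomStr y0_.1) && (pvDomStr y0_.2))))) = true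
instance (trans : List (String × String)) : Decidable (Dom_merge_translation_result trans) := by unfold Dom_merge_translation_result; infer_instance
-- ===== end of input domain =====

-- B replaces A's buffer-and-flag single pass by splitting the list into maximal runs; alternative decomposition, not faster.

-- ===== PORT A =====
-- state = (texbuf, tranbuf, prev_is_translated, result)
def stepA (s : String × String × Bool × List (String × String)) (p : String × String) :
    String × String × Bool × List (String × String) :=
  if p.1 == p.2 then (s.1 ++ p.1, s.2.1 ++ p.2, false, s.2.2.2)
  else
    let s' := if !s.2.2.1 then (("" : String), ("" : String), true, s.2.2.2 ++ [(s.1, s.2.1)]) else s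
    (s'.1, s'.2.1, s'.2.2.1, s'.2.2.2 ++ [p])

def merge_translation_result (trans : List (String × String)) : List (String × String) :=
  let st := trans.foldl stepA ("", "", true, [])
  if !st.2.2.1 then st.2.2.2 ++ [(st.1, st.2.1)] else st.2.2.2

-- ===== PORT B =====
def merge_translation_result_alt : List (String × String) → List (String × String)
  | [] => []
  | (t, r) :: rest =>
    if t == r then
      let run := ((t, r) :: rest).takeWhile (fun q => q.1 == q.2)
      ((run.map Prod.fst).foldl (· ++ ·) "", (run.map Prod.snd).foldl (· ++ ·) "") ::
        merge_translation_result_alt (((t, r) :: rest).dropWhile (fun q => q.1 == q.2))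
    else (t, r) :: merge_translation_result_alt rest
termination_by l => l.length
decreasing_by
  · simp only [List.dropWhile]
    split
    · have := List.length_dropWhile_le (fun q : String × String => q.1 == q.2) rest
      simp; omega
    · simp_all
  · simp

-- ===== PRECONDITION & SPEC =====
def Spec_merge_translation_result (trans : List (String × String)) (out : List (String × String)) : Prop := out = merge_translation_result_alt trans
instance (trans : List (String × String)) (out : List (String × String)) : Decidable (Spec_merge_translation_result trans out) := by unfold Spec_merge_translation_result; infer_instance

-- ===== CLAIM (what is proved, stated in full; the proofs are below) =====
def Claim_equal_merge_translation_result : Prop := ∀ (trans : List (String × String)), Dom_merge_translation_result trans → Spec_merge_translation_result trans (merge_translation_result trans)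

-- ===== LEMMAS AND PROOFS =====

-- "finish" of A's loop state
def finishA (s : String × String × Bool × List (String × String)) : List (String × String) :=
  if !s.2.2.1 then s.2.2.2 ++ [(s.1, s.2.1)] else s.2.2.2

-- merged run continuation with pending buffers
def mergeM (bt br : String) (l : List (String × String)) : List (String × String) :=
  (((l.takeWhile (fun q => q.1 == q.2)).map Prod.fst).foldl (· ++ ·) bt,
   ((l.takeWhile (fun q => q.1 == q.2)).map Prod.snd).foldl (· ++ ·) br) ::
    merge_translation_result_alt (l.dropWhile (fun q => q.1 == q.2))

theorem loopA_char (l : List (String × String)) : ∀ (res : List (String × String)) (bt br : String),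
    finishA (l.foldl stepA (bt, br, false, res)) = res ++ mergeM bt br l ∧
    finishA (l.foldl stepA ("", "", true, res)) = res ++ merge_translation_result_alt l := by
  induction l with
  | nil =>
    intro res bt br
    simp [finishA, mergeM, merge_translation_result_alt]
  | cons p rest ih =>
    intro res bt br
    obtain ⟨t, r⟩ := p
    by_cases h : t == r
    · constructor
      · simp only [List.foldl_cons, stepA, h, if_pos]
        rw [(ih res (bt ++ t) (br ++ r)).1]
        simp [mergeM, List.takeWhile, List.dropWhile, h]
      · simp only [List.foldl_cons, stepA, h, if_pos]
        simp only [String.empty_append]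
        rw [(ih res t r).1]
        simp [mergeM, merge_translation_result_alt, beq_iff_eq.mp h]
    · constructor
      · simp only [List.foldl_cons, stepA, h]
        simp only [Bool.not_false, if_pos, if_neg, Bool.false_eq_true,
          not_false_iff]
        rw [(ih (res ++ [(bt, br)] ++ [(t, r)]) "" "").2]
        simp [mergeM, merge_translation_result_alt, List.takeWhile, List.dropWhile, h]
      · simp only [List.foldl_cons, stepA, h]
        simp only [Bool.not_true, Bool.false_eq_true, if_false]
        rw [(ih (res ++ [(t, r)]) "" "").2]
        simp [merge_translation_result_alt, h]

-- ===== VERDICT (by name: the statement is the Claim_ definition above) =====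
theorem merge_translation_result_spec : Claim_equal_merge_translation_result := by
  intro trans _
  unfold Spec_merge_translation_result merge_translation_result
  have := (loopA_char trans [] "" "").2
  simpa [finishA] using this
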